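-- pv_equiv track=rewrite | github.com/harrynguyen14/product-agent | actions/react_loop.py | parse
-- ===== SOURCE A (Python) =====
-- FINAL_ANSWER_PREFIX = "Final Answer:"
--
-- THOUGHT_PREFIX = "Thought:"
--
-- ACTION_PREFIX = "Action:"
--
-- def parse(raw: str) -> tuple[str, str, str, bool, str]:
--     """Returns (thought, tool_name, tool_arg, is_final, final_answer)."""
--     thought = ""
--     tool_name = ""
--     tool_arg = ""
--     is_final = False
--     final_answer = ""
--
--     for line in raw.splitlines():
--         stripped = line.strip()
--         if stripped.startswith(THOUGHT_PREFIX):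
--             thought = stripped[len(THOUGHT_PREFIX):].strip()
--         elif stripped.startswith(FINAL_ANSWER_PREFIX):
--             is_final = True
--             final_answer = stripped[len(FINAL_ANSWER_PREFIX):].strip()
--         elif stripped.startswith(ACTION_PREFIX):
--             action_str = stripped[len(ACTION_PREFIX):].strip()
--             # Parse "tool_name(arg)" or "tool_name: arg"
--             if "(" in action_str and action_str.endswith(")"):
--                 tool_name = action_str[: action_str.index("(")]
--                 tool_arg = action_str[action_str.index("(") + 1 : -1]
--             elif ":" in action_str:
--                 parts = action_str.split(":", 1)
--                 tool_name = parts[0].strip()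
--                 tool_arg = parts[1].strip()
--             else:
--                 tool_name = action_str
--                 tool_arg = ""
--
--     return thought, tool_name, tool_arg, is_final, final_answer
-- ===== SOURCE B (Python) =====
-- FINAL_ANSWER_PREFIX = "Final Answer:"
-- THOUGHT_PREFIX = "Thought:"
-- ACTION_PREFIX = "Action:"
--
--
-- def _last_after(prefix, lines):
--     """Content (stripped) after the last line starting with prefix, or None."""
--     found = None
--     for s in lines:
--         if s.startswith(prefix):
--             found = s[len(prefix):].strip()
--     return found
--
--
-- def _parse_action(action_str):
--     if "(" in action_str and action_str.endswith(")"):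
--         i = action_str.index("(")
--         return action_str[:i], action_str[i + 1:-1]
--     if ":" in action_str:
--         name, arg = action_str.split(":", 1)
--         return name.strip(), arg.strip()
--     return action_str, ""
--
--
-- def parse(raw: str) -> tuple[str, str, str, bool, str]:
--     """Returns (thought, tool_name, tool_arg, is_final, final_answer)."""
--     lines = [line.strip() for line in raw.splitlines()]
--     thought = _last_after(THOUGHT_PREFIX, lines)
--     final = _last_after(FINAL_ANSWER_PREFIX, lines)
--     action = _last_after(ACTION_PREFIX, lines)
--     tool_name, tool_arg = _parse_action(action) if action is not None else ("", "")
--     return (thought or "", tool_name, tool_arg,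
--             final is not None, final if final is not None else "")
-- ===== Notes on version B (the rewrite author's own statement) =====
-- stated objective: alternative
-- what changed: Replaces A's single stateful dispatch loop over a 5-field accumulator with three independent last-match scans (one per prefix) over the pre-stripped lines, deriving is_final from the optional final-answer match and sub-parsing only the last Action line once at the end.
import Mathlib
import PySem

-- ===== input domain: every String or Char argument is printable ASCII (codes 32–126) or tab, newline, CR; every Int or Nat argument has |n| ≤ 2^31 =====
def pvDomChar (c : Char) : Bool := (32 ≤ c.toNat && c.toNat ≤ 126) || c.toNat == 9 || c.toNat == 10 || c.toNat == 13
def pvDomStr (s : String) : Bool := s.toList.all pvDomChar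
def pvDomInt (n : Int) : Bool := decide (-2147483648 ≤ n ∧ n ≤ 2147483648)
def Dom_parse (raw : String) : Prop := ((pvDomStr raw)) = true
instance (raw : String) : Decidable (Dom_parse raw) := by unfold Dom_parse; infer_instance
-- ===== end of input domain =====

-- B replaces A's single stateful dispatch loop by three independent per-prefix last-match scans (alternative decomposition, same cost).

-- ===== PORT A =====
-- literal transliteration of A's loop: one fold over splitlines with the 5-field state
def parseStepA (st : String × String × String × Bool × String) (line : String) :
    String × String × String × Bool × String :=
  let (thought, tool_name, tool_arg, is_final, final_answer) := st
  let stripped := PySem.Str.strip line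
  if PySem.Str.startswith stripped "Thought:" then
    (PySem.Str.strip (PySem.Str.slice stripped (some 8) none), tool_name, tool_arg, is_final, final_answer)
  else if PySem.Str.startswith stripped "Final Answer:" then
    (thought, tool_name, tool_arg, true, PySem.Str.strip (PySem.Str.slice stripped (some 13) none))
  else if PySem.Str.startswith stripped "Action:" then
    let action_str := PySem.Str.strip (PySem.Str.slice stripped (some 7) none)
    if PySem.Str.isIn "(" action_str && PySem.Str.endswith action_str ")" then
      -- action_str.index("(") cannot raise here ('(' is in action_str), so find = index
      (thought,
       PySem.Str.slice action_str none (some (PySem.Str.find action_str "(")),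
       PySem.Str.slice action_str (some (PySem.Str.find action_str "(" + 1)) (some (-1)),
       is_final, final_answer)
    else if PySem.Str.isIn ":" action_str then
      -- split(":",1) with ":" present yields exactly two parts, so the getD defaults are never used
      let parts := (PySem.Str.splitMax? action_str ":" 1).getD []
      (thought,
       PySem.Str.strip ((PySem.List.pyGet? parts 0).getD ""),
       PySem.Str.strip ((PySem.List.pyGet? parts 1).getD ""),
       is_final, final_answer)
    else
      (thought, action_str, "", is_final, final_answer)
  else st

def parse (raw : String) : String × String × String × Bool × String :=
  (PySem.Str.splitlines raw).foldl parseStepA ("", "", "", false, "")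

-- ===== PORT B =====
-- content (stripped) after the last line starting with `pre`, scanning forward (Source B's _last_after)
def lastAfter (pre : String) (lines : List String) : Option String :=
  lines.foldl
    (fun acc s =>
      if PySem.Str.startswith s pre then
        some (PySem.Str.strip (PySem.Str.slice s (some (PySem.Str.len pre)) none))
      else acc)
    none

-- Source B's _parse_action
def parseAction (a : String) : String × String :=
  if PySem.Str.isIn "(" a && PySem.Str.endswith a ")" then
    (PySem.Str.slice a none (some (PySem.Str.find a "(")),
     PySem.Str.slice a (some (PySem.Str.find a "(" + 1)) (some (-1)))
  else if PySem.Str.isIn ":" a then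
    let parts := (PySem.Str.splitMax? a ":" 1).getD []
    (PySem.Str.strip ((PySem.List.pyGet? parts 0).getD ""),
     PySem.Str.strip ((PySem.List.pyGet? parts 1).getD ""))
  else (a, "")

def parse_alt (raw : String) : String × String × String × Bool × String :=
  let lines := (PySem.Str.splitlines raw).map PySem.Str.strip
  let thought := lastAfter "Thought:" lines
  let final := lastAfter "Final Answer:" lines
  let action := lastAfter "Action:" lines
  let (tool_name, tool_arg) := match action with
    | some a => parseAction a
    | none => ("", "")
  (thought.getD "", tool_name, tool_arg, final.isSome, final.getD "")

-- ===== PRECONDITION & SPEC =====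
def Spec_parse (raw : String) (out : String × String × String × Bool × String) : Prop := out = parse_alt raw
instance (raw : String) (out : String × String × String × Bool × String) : Decidable (Spec_parse raw out) := by unfold Spec_parse; infer_instance

-- ===== CLAIM (what is proved, stated in full; the proofs are below) =====
def Claim_equal_parse : Prop := ∀ (raw : String), Dom_parse raw → Spec_parse raw (parse raw)

-- ===== LEMMAS AND PROOFS =====

-- two distinct first characters: a line cannot start with two of the three prefixes
theorem ex_T_FA (s : String) (h : PySem.Str.startswith s "Thought:" = true) :
    PySem.Str.startswith s "Final Answer:" = false := by
  simp only [PySem.Str.startswith, PySem.Chars.startswith] at *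
  rcases hs : s.toList with _ | ⟨c, cs⟩ <;> rw [hs] at h <;> simp [List.isPrefixOf] at h ⊢
  · exact fun h2 => absurd (h2.trans h.1.symm) (by decide)

theorem ex_T_A (s : String) (h : PySem.Str.startswith s "Thought:" = true) :
    PySem.Str.startswith s "Action:" = false := by
  simp only [PySem.Str.startswith, PySem.Chars.startswith] at *
  rcases hs : s.toList with _ | ⟨c, cs⟩ <;> rw [hs] at h <;> simp [List.isPrefixOf] at h ⊢
  · exact fun h2 => absurd (h2.trans h.1.symm) (by decide)

theorem ex_FA_A (s : String) (h : PySem.Str.startswith s "Final Answer:" = true) :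
    PySem.Str.startswith s "Action:" = false := by
  simp only [PySem.Str.startswith, PySem.Chars.startswith] at *
  rcases hs : s.toList with _ | ⟨c, cs⟩ <;> rw [hs] at h <;> simp [List.isPrefixOf] at h ⊢
  · exact fun h2 => absurd (h2.trans h.1.symm) (by decide)

theorem len_T : PySem.Str.len "Thought:" = 8 := by decide
theorem len_FA : PySem.Str.len "Final Answer:" = 13 := by decide
theorem len_A : PySem.Str.len "Action:" = 7 := by decide

theorem lastAfter_acc (pre : String) (ls : List String) (acc : Option String) :
    ls.foldl
      (fun acc s =>
        if PySem.Str.startswith s pre then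
          some (PySem.Str.strip (PySem.Str.slice s (some (PySem.Str.len pre)) none))
        else acc)
      acc
      = match lastAfter pre ls with
        | some v => some v
        | none => acc := by
  induction ls generalizing acc with
  | nil => simp [lastAfter]
  | cons x ls ih =>
    rw [List.foldl_cons, ih]
    have hx : lastAfter pre (x :: ls)
        = match lastAfter pre ls with
          | some v => some v
          | none =>
            if PySem.Str.startswith x pre then
              some (PySem.Str.strip (PySem.Str.slice x (some (PySem.Str.len pre)) none))
            else none := by
      show List.foldl _ _ (x :: ls) = _
      rw [List.foldl_cons]
      exact ih _
    rw [hx]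
    cases lastAfter pre ls <;>
      by_cases hc : PySem.Str.startswith x pre = true <;> simp [PySem.Str.startswith] <;> simp [PySem.Str.startswith] at hc <;> simp [hc]

theorem lastAfter_cons (pre : String) (x : String) (ls : List String) :
    lastAfter pre (x :: ls)
      = match lastAfter pre ls with
        | some v => some v
        | none =>
          if PySem.Str.startswith x pre then
            some (PySem.Str.strip (PySem.Str.slice x (some (PySem.Str.len pre)) none))
          else none := by
  show List.foldl _ _ (x :: ls) = _
  rw [List.foldl_cons, lastAfter_acc]

theorem stepA_eq (st : String × String × String × Bool × String) (x : String) :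
    parseStepA st x =
      (if PySem.Str.startswith (PySem.Str.strip x) "Thought:" then
        (PySem.Str.strip (PySem.Str.slice (PySem.Str.strip x) (some 8) none), st.2.1, st.2.2.1, st.2.2.2.1, st.2.2.2.2)
      else if PySem.Str.startswith (PySem.Str.strip x) "Final Answer:" then
        (st.1, st.2.1, st.2.2.1, true, PySem.Str.strip (PySem.Str.slice (PySem.Str.strip x) (some 13) none))
      else if PySem.Str.startswith (PySem.Str.strip x) "Action:" then
        (st.1,
         (parseAction (PySem.Str.strip (PySem.Str.slice (PySem.Str.strip x) (some 7) none))).1,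
         (parseAction (PySem.Str.strip (PySem.Str.slice (PySem.Str.strip x) (some 7) none))).2,
         st.2.2.2.1, st.2.2.2.2)
      else st) := by
  obtain ⟨t, tn, ta, f, fa⟩ := st
  simp only [parseStepA, parseAction]
  split_ifs <;> rfl

set_option maxHeartbeats 2000000 in
theorem loop_eq (ls : List String) (t tn ta : String) (f : Bool) (fa : String) :
    ls.foldl parseStepA (t, tn, ta, f, fa) =
      ((lastAfter "Thought:" (ls.map PySem.Str.strip)).getD t,
       (match lastAfter "Action:" (ls.map PySem.Str.strip) with
          | some a => parseAction a | none => (tn, ta)).1,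
       (match lastAfter "Action:" (ls.map PySem.Str.strip) with
          | some a => parseAction a | none => (tn, ta)).2,
       f || (lastAfter "Final Answer:" (ls.map PySem.Str.strip)).isSome,
       (lastAfter "Final Answer:" (ls.map PySem.Str.strip)).getD fa) := by
  induction ls generalizing t tn ta f fa with
  | nil => simp [lastAfter]
  | cons x ls ih =>
    rw [List.foldl_cons, stepA_eq, List.map_cons,
        lastAfter_cons "Thought:", lastAfter_cons "Final Answer:", lastAfter_cons "Action:",
        len_T, len_FA, len_A]
    by_cases hT : PySem.Str.startswith (PySem.Str.strip x) "Thought:" = true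
    · simp only [hT, ex_T_FA _ hT, ex_T_A _ hT, if_true, if_false, Bool.false_eq_true, ih]
      cases lastAfter "Thought:" (ls.map PySem.Str.strip) <;>
        cases lastAfter "Final Answer:" (ls.map PySem.Str.strip) <;>
        cases lastAfter "Action:" (ls.map PySem.Str.strip) <;> simp
    · rw [Bool.not_eq_true] at hT
      by_cases hFA : PySem.Str.startswith (PySem.Str.strip x) "Final Answer:" = true
      · simp only [hT, hFA, ex_FA_A _ hFA, if_true, if_false, Bool.false_eq_true, ih]
        cases lastAfter "Thought:" (ls.map PySem.Str.strip) <;>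
          cases lastAfter "Final Answer:" (ls.map PySem.Str.strip) <;>
          cases lastAfter "Action:" (ls.map PySem.Str.strip) <;> simp
      · rw [Bool.not_eq_true] at hFA
        by_cases hA : PySem.Str.startswith (PySem.Str.strip x) "Action:" = true
        · simp only [hT, hFA, hA, if_true, if_false, Bool.false_eq_true, ih]
          cases lastAfter "Thought:" (ls.map PySem.Str.strip) <;>
            cases lastAfter "Final Answer:" (ls.map PySem.Str.strip) <;>
            cases lastAfter "Action:" (ls.map PySem.Str.strip) <;> simp
        · rw [Bool.not_eq_true] at hA
          simp only [hT, hFA, hA, if_false, Bool.false_eq_true, ih]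
          cases lastAfter "Thought:" (ls.map PySem.Str.strip) <;>
            cases lastAfter "Final Answer:" (ls.map PySem.Str.strip) <;>
            cases lastAfter "Action:" (ls.map PySem.Str.strip) <;> simp

-- ===== VERDICT (by name: the statement is the Claim_ definition above) =====
theorem parse_spec : Claim_equal_parse := by
  intro raw _
  unfold Spec_parse parse parse_alt
  rw [loop_eq]
  show _ = ((lastAfter "Thought:" ((PySem.Str.splitlines raw).map PySem.Str.strip)).getD "",
    (match lastAfter "Action:" ((PySem.Str.splitlines raw).map PySem.Str.strip) with
      | some a => parseAction a | none => ("", "")).1,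
    (match lastAfter "Action:" ((PySem.Str.splitlines raw).map PySem.Str.strip) with
      | some a => parseAction a | none => ("", "")).2,
    (lastAfter "Final Answer:" ((PySem.Str.splitlines raw).map PySem.Str.strip)).isSome,
    (lastAfter "Final Answer:" ((PySem.Str.splitlines raw).map PySem.Str.strip)).getD "")
  cases lastAfter "Thought:" ((PySem.Str.splitlines raw).map PySem.Str.strip) <;>
    cases lastAfter "Final Answer:" ((PySem.Str.splitlines raw).map PySem.Str.strip) <;>
    cases lastAfter "Action:" ((PySem.Str.splitlines raw).map PySem.Str.strip) <;> simp
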